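-- pv_equiv track=rewrite | github.com/gertjanbron/zornq | code/schur_complement.py | find_bfs_separator
-- ===== SOURCE A (Python) =====
-- from collections import defaultdict
--
-- def find_bfs_separator(n_nodes, edges, source=None):
--     """
--     Vind een separator via BFS-layers.
--     Kies de layer met de kleinste breedte als separator.
--
--     Returns:
--         separator: set van nodes
--         interior: set van nodes aan een kant
--         exterior: set van nodes aan andere kant
--     """
--     adj = defaultdict(list)
--     for u, v, w in edges:
--         adj[int(u)].append(int(v))
--         adj[int(v)].append(int(u))
--
--     if source is None:
--         # Kies node met laagste graad
--         degrees = {v: len(adj[v]) for v in range(n_nodes)}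
--         source = min(degrees, key=degrees.get)
--
--     # BFS layers
--     visited = {source}
--     layers = [[source]]
--     while len(visited) < n_nodes:
--         next_layer = []
--         for v in layers[-1]:
--             for u in adj[v]:
--                 if u not in visited:
--                     visited.add(u)
--                     next_layer.append(u)
--         if not next_layer:
--             break
--         layers.append(next_layer)
--
--     if len(layers) < 3:
--         return set(), set(range(n_nodes)), set()
--
--     # Kies smalste layer als separator
--     min_width = len(layers[1])
--     min_idx = 1
--     for i in range(1, len(layers) - 1):
--         if len(layers[i]) < min_width:
--             min_width = len(layers[i])
--             min_idx = i
--
--     separator = set(layers[min_idx])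
--     interior = set()
--     for i in range(min_idx):
--         interior.update(layers[i])
--     exterior = set()
--     for i in range(min_idx + 1, len(layers)):
--         exterior.update(layers[i])
--
--     return separator, interior, exterior
-- ===== SOURCE B (Python) =====
-- from collections import deque
--
--
-- def find_bfs_separator(n_nodes, edges, source=None):
--     """Separator via a single queue-based BFS: build a distance map, pick the
--     narrowest intermediate distance ring, and partition nodes by distance."""
--     adj = {}
--     for u, v, w in edges:
--         adj.setdefault(int(u), []).append(int(v))
--         adj.setdefault(int(v), []).append(int(u))
--
--     if source is None:
--         source = min(range(n_nodes), key=lambda v: len(adj.get(v, [])))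
--
--     # single FIFO BFS filling a node -> distance map
--     dist = {source: 0}
--     queue = deque([(source, 0)])
--     while queue:
--         v, dv = queue.popleft()
--         for u in adj.get(v, []):
--             if u not in dist:
--                 dist[u] = dv + 1
--                 queue.append((u, dv + 1))
--
--     maxd = max(dist.values())
--     if maxd < 2:
--         return set(), set(range(n_nodes)), set()
--
--     # first strictly-narrowest ring among distances 1 .. maxd-1
--     width = {}
--     for d in dist.values():
--         width[d] = width.get(d, 0) + 1
--     best = 1
--     for d in range(2, maxd):
--         if width[d] < width[best]:
--             best = d
--
--     separator = {v for v, d in dist.items() if d == best}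
--     interior = {v for v, d in dist.items() if d < best}
--     exterior = {v for v, d in dist.items() if d > best}
--     return separator, interior, exterior
-- ===== Notes on version B (the rewrite author's own statement) =====
-- stated objective: alternative
-- what changed: Replaces A's list-of-layers BFS (appending per-layer lists, then set-union loops over layer indices) by a single FIFO-queue BFS that fills a node-to-distance dict, picks the narrowest intermediate distance by counting distances, and partitions nodes by comparing each node's distance to it.
-- outside the precondition, e.g. on find_bfs_separator(2, [(0, 2, 1), (2, 1, 1)], None): A returns (set(), {0, 1}, set()), B returns ({2}, {0}, {1})
import Mathlib
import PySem

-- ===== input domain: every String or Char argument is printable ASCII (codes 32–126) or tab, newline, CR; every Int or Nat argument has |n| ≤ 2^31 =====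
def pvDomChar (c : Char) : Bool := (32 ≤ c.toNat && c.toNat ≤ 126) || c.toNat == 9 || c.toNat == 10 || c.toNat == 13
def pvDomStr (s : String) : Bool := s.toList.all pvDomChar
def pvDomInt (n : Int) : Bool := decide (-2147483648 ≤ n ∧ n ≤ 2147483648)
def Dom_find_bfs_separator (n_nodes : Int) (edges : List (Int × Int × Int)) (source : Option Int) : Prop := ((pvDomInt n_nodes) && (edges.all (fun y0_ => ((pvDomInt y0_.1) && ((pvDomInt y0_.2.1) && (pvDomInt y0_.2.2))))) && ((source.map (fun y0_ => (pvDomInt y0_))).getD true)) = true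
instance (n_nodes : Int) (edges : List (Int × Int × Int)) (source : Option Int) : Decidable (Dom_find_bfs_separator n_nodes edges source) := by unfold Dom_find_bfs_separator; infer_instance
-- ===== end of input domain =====

-- B replaces A's list-of-layers BFS by a single queue BFS filling a node→distance
-- dict and partitions nodes by comparing distances to the narrowest ring (objective:
-- alternative decomposition, same asymptotic cost).

-- ===== PORT A =====
-- adj = defaultdict(list); adj[u].append(v); adj[v].append(u)  (defaultdict access ≡ modify with default [])
def pvAdjA (edges : List (Int × Int × Int)) : PySem.Dict Int (List Int) :=
  edges.foldl
    (fun d e => (PySem.Dict.modify d e.1 [] (fun l => l ++ [e.2.1])).modify e.2.1 [] (fun l => l ++ [e.1]))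
    PySem.Dict.empty

-- inner 'for u in adj[v]: if u not in visited: visited.add(u); next_layer.append(u)'
def pvExpandNodeA (adj : PySem.Dict Int (List Int)) (p : PySem.Set Int × List Int) (v : Int) :
    PySem.Set Int × List Int :=
  (adj.getD v []).foldl
    (fun q u => if PySem.Set.contains q.1 u then q else (PySem.Set.add q.1 u, q.2 ++ [u])) p

-- 'while len(visited) < n_nodes: …'; fuel 2*|edges|+2 always suffices: each
-- continued iteration adds at least one new visited node and visited holds only
-- the source plus distinct edge endpoints.
def pvLoopA (adj : PySem.Dict Int (List Int)) (n_nodes : Int) :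
    Nat → PySem.Set Int → List (List Int) → List (List Int)
  | 0, _, layers => layers
  | fuel+1, visited, layers =>
    if (visited.length : Int) < n_nodes then
      let st := (PySem.List.pyGetD layers (-1) []).foldl (pvExpandNodeA adj) (visited, [])
      if st.2 = [] then layers else pvLoopA adj n_nodes fuel st.1 (layers ++ [st.2])
    else layers

def find_bfs_separator (n_nodes : Int) (edges : List (Int × Int × Int)) (source : Option Int) :
    List Int × List Int × List Int :=
  let adj := pvAdjA edges
  let src : Int := match source with
    | some s => s
    -- min(degrees, key=degrees.get) over degrees = {v: len(adj[v]) for v in range(n_nodes)}: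
    -- first key of range(n_nodes) with minimal degree; none (n_nodes ≤ 0) = Python ValueError, excluded by Pre_
    | none => (PySem.List.min? (PySem.List.pyRange 0 n_nodes 1)
        (fun v => ((adj.getD v []).length : Int))).getD 0
  let layers := pvLoopA adj n_nodes (2 * edges.length + 2) (PySem.Set.ofList [src]) [[src]]
  if (layers.length : Int) < 3 then
    (PySem.Set.empty, PySem.Set.ofList (PySem.List.pyRange 0 n_nodes 1), PySem.Set.empty)
  else
    -- min-width scan over layers[1 .. len-2]
    let st := (PySem.List.pyRange 1 ((layers.length : Int) - 1) 1).foldl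
      (fun (p : Int × Int) i =>
        if ((PySem.List.pyGetD layers i []).length : Int) < p.1 then
          (((PySem.List.pyGetD layers i []).length : Int), i)
        else p)
      (((PySem.List.pyGetD layers 1 []).length : Int), 1)
    let separator := PySem.Set.ofList (PySem.List.pyGetD layers st.2 [])
    let interior := (PySem.List.pyRange 0 st.2 1).foldl
      (fun s i => PySem.Set.update s (PySem.List.pyGetD layers i [])) PySem.Set.empty
    let exterior := (PySem.List.pyRange (st.2 + 1) (layers.length : Int) 1).foldl
      (fun s i => PySem.Set.update s (PySem.List.pyGetD layers i [])) PySem.Set.empty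
    (separator, interior, exterior)

-- ===== PORT B =====
-- adj.setdefault(u, []).append(v): ensure the key, then append in place (= modify)
def pvAdjB (edges : List (Int × Int × Int)) : PySem.Dict Int (List Int) :=
  edges.foldl
    (fun d e =>
      let d1 := (PySem.Dict.setdefault d e.1 []).modify e.1 [] (fun l => l ++ [e.2.1])
      (PySem.Dict.setdefault d1 e.2.1 []).modify e.2.1 [] (fun l => l ++ [e.1]))
    PySem.Dict.empty

-- 'while queue: v, dv = queue.popleft(); …'; fuel 2*|edges|+2 always suffices:
-- every pop was a push, and pushes are one per fresh dict key ⊆ source + endpoints.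
def pvBfsB (adj : PySem.Dict Int (List Int)) :
    Nat → List (Int × Int) → PySem.Dict Int Int → PySem.Dict Int Int
  | 0, _, dist => dist
  | _+1, [], dist => dist
  | fuel+1, (v, dv) :: rest, dist =>
      let st := (adj.getD v []).foldl
        (fun (p : PySem.Dict Int Int × List (Int × Int)) u =>
          if p.1.contains u then p else (p.1.insert u (dv + 1), p.2 ++ [(u, dv + 1)]))
        (dist, rest)
      pvBfsB adj fuel st.2 st.1

def find_bfs_separator_alt (n_nodes : Int) (edges : List (Int × Int × Int)) (source : Option Int) :
    List Int × List Int × List Int :=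
  let adj := pvAdjB edges
  let src : Int := match source with
    | some s => s
    -- min(range(n_nodes), key=lambda v: len(adj.get(v, []))): none = ValueError, excluded by Pre_
    | none => (PySem.List.min? (PySem.List.pyRange 0 n_nodes 1)
        (fun v => ((adj.getD v []).length : Int))).getD 0
  let dist := pvBfsB adj (2 * edges.length + 2) [(src, 0)] (PySem.Dict.empty.insert src 0)
  -- max(dist.values()): dist always holds the source, never none
  let maxd := (PySem.List.max? dist.values (fun x => x)).getD 0
  if maxd < 2 then
    (PySem.Set.empty, PySem.Set.ofList (PySem.List.pyRange 0 n_nodes 1), PySem.Set.empty)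
  else
    -- width[d] = width.get(d, 0) + 1
    let width := dist.values.foldl (fun w d => PySem.Dict.modify w d 0 (fun c => c + 1))
      (PySem.Dict.empty : PySem.Dict Int Int)
    -- width[d] lookups: every distance 1..maxd-1 occurs, so getD never falls to the default
    let best := (PySem.List.pyRange 2 maxd 1).foldl
      (fun b d => if width.getD d 0 < width.getD b 0 then d else b) 1
    (PySem.Set.ofList ((dist.items.filter (fun p => p.2 == best)).map (fun p => p.1)),
     PySem.Set.ofList ((dist.items.filter (fun p => decide (p.2 < best))).map (fun p => p.1)),
     PySem.Set.ofList ((dist.items.filter (fun p => decide (best < p.2))).map (fun p => p.1)))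

-- ===== PRECONDITION & SPEC =====
-- Pre_ excludes (i) source=None with n_nodes ≤ 0, where A raises ValueError (min of an
-- empty dict), and (ii) malformed graphs — edge lists naming endpoints outside
-- range(n_nodes) — when moreover the BFS actually visits an edge (the source touches the
-- edge list, or is picked from an n_nodes that is not larger than the number of distinct
-- endpoints): there A's 'len(visited) < n_nodes' cutoff can truncate the BFS at an
-- accidental layer.
def Pre_find_bfs_separator (n_nodes : Int) (edges : List (Int × Int × Int)) (source : Option Int) : Prop :=
  (source = none → 0 < n_nodes) ∧
  ((∀ e ∈ edges, 0 ≤ e.1 ∧ e.1 < n_nodes ∧ 0 ≤ e.2.1 ∧ e.2.1 < n_nodes) ∨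
    (((edges.flatMap (fun e => [e.1, e.2.1])).dedup.length : Int) + 1 ≤ n_nodes) ∨
    ((source.map (fun s => !((edges.flatMap (fun e => [e.1, e.2.1])).contains s))).getD false = true) ∨
    (source = none ∧ ∀ x ∈ edges.flatMap (fun e => [e.1, e.2.1]), ¬(0 ≤ x ∧ x < n_nodes)))

instance (n_nodes : Int) (edges : List (Int × Int × Int)) (source : Option Int) :
    Decidable (Pre_find_bfs_separator n_nodes edges source) := by
  unfold Pre_find_bfs_separator; infer_instance

def pvWitness_find_bfs_separator : Int × (List (Int × Int × Int)) × Option Int :=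
  (3, [(0, 1, 1), (1, 2, 1)], none)

def Spec_find_bfs_separator (n_nodes : Int) (edges : List (Int × Int × Int)) (source : Option Int)
    (out : List Int × List Int × List Int) : Prop :=
  out = find_bfs_separator_alt n_nodes edges source

instance (n_nodes : Int) (edges : List (Int × Int × Int)) (source : Option Int)
    (out : List Int × List Int × List Int) : Decidable (Spec_find_bfs_separator n_nodes edges source out) := by
  unfold Spec_find_bfs_separator; infer_instance

-- ===== CLAIM (what is proved, stated in full; the proofs are below) =====
def Claim_equal_find_bfs_separator : Prop :=
  ∀ (n_nodes : Int) (edges : List (Int × Int × Int)) (source : Option Int),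
    Dom_find_bfs_separator n_nodes edges source →
    Pre_find_bfs_separator n_nodes edges source →
    Spec_find_bfs_separator n_nodes edges source (find_bfs_separator n_nodes edges source)

-- ===== LEMMAS AND PROOFS =====

-- endpoints named by the edge list (with multiplicity)
def pvEp (edges : List (Int × Int × Int)) : List Int := edges.flatMap (fun e => [e.1, e.2.1])

-- how many candidate nodes of E are not yet visited
def pvCap (E vis : List Int) : Nat := (E.filter (fun u => !(vis.contains u))).length

-- The fresh elements a candidate list contributes against a growing visited list.
def pvFresh (us : List Int) (vis : List Int) : List Int :=
  match us with
  | [] => []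
  | u :: us' => if vis.contains u then pvFresh us' vis else u :: pvFresh us' (vis ++ [u])

-- The fresh elements a whole layer contributes.
def pvFreshLayer (adj : PySem.Dict Int (List Int)) (cur : List Int) (vis : List Int) : List Int :=
  match cur with
  | [] => []
  | v :: vs =>
      let f := pvFresh (adj.getD v []) vis
      f ++ pvFreshLayer adj vs (vis ++ f)

-- The layers produced after frontier `cur` (all of which is already in `vis`).
def pvLayersRest (adj : PySem.Dict Int (List Int)) : Nat → List Int → List Int → List (List Int)
  | 0, _, _ => []
  | f+1, cur, vis =>
      let nx := pvFreshLayer adj cur vis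
      if nx = [] then [] else nx :: pvLayersRest adj f nx (vis ++ nx)

-- Tagging the flattened layers with their distances.
def pvTagFlat (d : Int) : List (List Int) → List (Int × Int)
  | [] => []
  | l :: ls => l.map (fun u => (u, d)) ++ pvTagFlat (d + 1) ls

-- The (node, dist) pairs pvBfsB will append, from queue and visited key list.
def pvGhost (adj : PySem.Dict Int (List Int)) : Nat → List (Int × Int) → List Int → List (Int × Int)
  | 0, _, _ => []
  | _+1, [], _ => []
  | f+1, (v, dv) :: rest, vis =>
      let fr := pvFresh (adj.getD v []) vis
      fr.map (fun u => (u, dv + 1)) ++ pvGhost adj f (rest ++ fr.map (fun u => (u, dv + 1))) (vis ++ fr)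

theorem pvFresh_cons_mem {u : Int} {vis : List Int} (us : List Int) (h : u ∈ vis) :
    pvFresh (u :: us) vis = pvFresh us vis := by
  have hc : vis.contains u = true := by simpa using h
  rw [pvFresh, hc]
  simp

theorem pvFresh_cons_not_mem {u : Int} {vis : List Int} (us : List Int) (h : u ∉ vis) :
    pvFresh (u :: us) vis = u :: pvFresh us (vis ++ [u]) := by
  have hc : vis.contains u = false := by simpa using h
  rw [pvFresh, hc]
  simp

theorem pv_setdefault_modify (d : PySem.Dict Int (List Int)) (k : Int) (f : List Int → List Int) :
    (d.setdefault k []).modify k [] f = d.modify k [] f := by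
  by_cases h : d.contains k
  · rw [PySem.Dict.setdefault_of_contains _ _ h]
  · have hc : d.contains k = false := by simpa using h
    rw [PySem.Dict.setdefault_of_not_contains _ _ hc]
    simp only [PySem.Dict.modify, PySem.Dict.insert_insert_self,
      PySem.Dict.getD_insert_self, PySem.Dict.getD_of_not_contains _ _ hc]

theorem pvAdjB_eq (edges : List (Int × Int × Int)) : pvAdjB edges = pvAdjA edges := by
  unfold pvAdjB pvAdjA
  apply PySem.List.foldl_congr_mem
  intro d e _
  simp only [pv_setdefault_modify]

theorem pv_fresh_fold (us : List Int) (vis : PySem.Set Int) (nx : List Int) :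
    us.foldl (fun q u => if PySem.Set.contains q.1 u then q else (PySem.Set.add q.1 u, q.2 ++ [u]))
      (vis, nx) = (vis ++ pvFresh us vis, nx ++ pvFresh us vis) := by
  induction us generalizing vis nx with
  | nil => simp [pvFresh]
  | cons u us ih =>
    rw [List.foldl_cons]
    by_cases h : u ∈ vis
    · have hc : PySem.Set.contains vis u = true := by simp [h]
      rw [pvFresh_cons_mem us h]
      simp only [hc, if_true]
      exact ih vis nx
    · have hc : PySem.Set.contains vis u = false := by simp [h]
      rw [pvFresh_cons_not_mem us h]
      simp only [hc, Bool.false_eq_true, if_false]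
      rw [PySem.Set.add_of_not_mem h, ih]
      simp [List.append_assoc]

theorem pv_layer_fold (adj : PySem.Dict Int (List Int)) (cur : List Int) (vis : PySem.Set Int)
    (nx : List Int) :
    cur.foldl (pvExpandNodeA adj) (vis, nx)
      = (vis ++ pvFreshLayer adj cur vis, nx ++ pvFreshLayer adj cur vis) := by
  induction cur generalizing vis nx with
  | nil => simp [pvFreshLayer]
  | cons v vs ih =>
    simp only [List.foldl_cons, pvFreshLayer, pvExpandNodeA, pv_fresh_fold, ih]
    simp

theorem pv_bnode (adj : PySem.Dict Int (List Int)) (us : List Int) (dist : PySem.Dict Int Int)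
    (q : List (Int × Int)) (dv : Int) :
    (us.foldl (fun (p : PySem.Dict Int Int × List (Int × Int)) u =>
        if p.1.contains u then p else (p.1.insert u (dv + 1), p.2 ++ [(u, dv + 1)])) (dist, q)).1.items
      = dist.items ++ (pvFresh us dist.keys).map (fun u => (u, dv + 1)) ∧
    (us.foldl (fun (p : PySem.Dict Int Int × List (Int × Int)) u =>
        if p.1.contains u then p else (p.1.insert u (dv + 1), p.2 ++ [(u, dv + 1)])) (dist, q)).2
      = q ++ (pvFresh us dist.keys).map (fun u => (u, dv + 1)) := by
  induction us generalizing dist q with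
  | nil => simp [pvFresh]
  | cons u us ih =>
    by_cases hm : u ∈ dist.keys
    · have h1 : dist.contains u = true := (PySem.Dict.contains_iff_mem_keys dist u).mpr hm
      rw [List.foldl_cons, pvFresh_cons_mem us hm]
      simp only [h1, if_true]
      exact ih dist q
    · have h1 : dist.contains u = false := by
        by_contra h
        exact hm ((PySem.Dict.contains_iff_mem_keys dist u).mp (by simpa using h))
      have hkeys : (dist.insert u (dv + 1)).keys = dist.keys ++ [u] :=
        PySem.Dict.keys_insert_of_not_contains _ _ h1
      have hitems : (dist.insert u (dv + 1)).items = dist.items ++ [(u, dv + 1)] :=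
        PySem.Dict.items_insert_of_not_contains _ _ h1
      rw [List.foldl_cons, pvFresh_cons_not_mem us hm]
      simp only [h1, Bool.false_eq_true, if_false]
      obtain ⟨ia, ib⟩ := ih (dist.insert u (dv + 1)) (q ++ [(u, dv + 1)])
      rw [ia, ib, hkeys, hitems]
      simp [List.append_assoc]

theorem pv_ghost_nil (adj : PySem.Dict Int (List Int)) (f : Nat) (vis : List Int) :
    pvGhost adj f [] vis = [] := by
  cases f <;> simp [pvGhost]

theorem pv_bfs_ghost (adj : PySem.Dict Int (List Int)) (fuel : Nat) (q : List (Int × Int))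
    (dist : PySem.Dict Int Int) :
    (pvBfsB adj fuel q dist).items = dist.items ++ pvGhost adj fuel q dist.keys := by
  induction fuel generalizing q dist with
  | zero => simp [pvBfsB, pvGhost]
  | succ f ih =>
    match q with
    | [] => simp [pvBfsB, pvGhost]
    | (v, dv) :: rest =>
      simp only [pvBfsB, pvGhost]
      obtain ⟨ia, ib⟩ := pv_bnode adj (adj.getD v []) dist rest dv
      rw [ih, ib, ia]
      have hkeys : ((adj.getD v []).foldl (fun (p : PySem.Dict Int Int × List (Int × Int)) u =>
          if p.1.contains u then p else (p.1.insert u (dv + 1), p.2 ++ [(u, dv + 1)]))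
          (dist, rest)).1.keys
          = dist.keys ++ pvFresh (adj.getD v []) dist.keys := by
        show ((_ : PySem.Dict Int Int).items.map Prod.fst) = _
        rw [ia]
        simp [PySem.Dict.keys, List.map_map, Function.comp_def]
      rw [hkeys]
      simp

theorem pv_fresh_spec (us vis : List Int) :
    (pvFresh us vis).Nodup ∧ ∀ x ∈ pvFresh us vis, x ∉ vis ∧ x ∈ us := by
  induction us generalizing vis with
  | nil => simp [pvFresh]
  | cons u us ih =>
    by_cases h : vis.contains u
    · simp only [pvFresh, h, if_true]
      obtain ⟨h1, h2⟩ := ih vis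
      exact ⟨h1, fun x hx => ⟨(h2 x hx).1, List.mem_cons_of_mem _ (h2 x hx).2⟩⟩
    · have hu : u ∉ vis := by simpa using h
      simp only [pvFresh, h, if_false]
      obtain ⟨h1, h2⟩ := ih (vis ++ [u])
      refine ⟨List.nodup_cons.mpr ⟨fun hc => ?_, h1⟩, ?_⟩
      · exact (h2 u hc).1 (by simp)
      · intro x hx
        rcases List.mem_cons.mp hx with rfl | hx'
        · exact ⟨hu, by simp⟩
        · exact ⟨fun hv => (h2 x hx').1 (by simp [hv]),
            List.mem_cons_of_mem _ (h2 x hx').2⟩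

theorem pv_freshLayer_spec (adj : PySem.Dict Int (List Int)) (cur vis : List Int) :
    (pvFreshLayer adj cur vis).Nodup ∧
      ∀ x ∈ pvFreshLayer adj cur vis, x ∉ vis ∧ ∃ v ∈ cur, x ∈ adj.getD v [] := by
  induction cur generalizing vis with
  | nil => simp [pvFreshLayer]
  | cons v vs ih =>
    simp only [pvFreshLayer]
    obtain ⟨f1, f2⟩ := pv_fresh_spec (adj.getD v []) vis
    obtain ⟨g1, g2⟩ := ih (vis ++ pvFresh (adj.getD v []) vis)
    refine ⟨List.Nodup.append f1 g1 ?_, ?_⟩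
    · intro x hxf hxg
      exact (g2 x hxg).1 (by simp [hxf])
    · intro x hx
      rcases List.mem_append.mp hx with hx1 | hx2
      · exact ⟨(f2 x hx1).1, v, by simp, (f2 x hx1).2⟩
      · obtain ⟨hnv, w, hw, hmem⟩ := g2 x hx2
        exact ⟨fun hv => hnv (by simp [hv]), w, List.mem_cons_of_mem _ hw, hmem⟩

theorem pv_fresh_nil (us vis : List Int) (h : ∀ x ∈ us, x ∈ vis) : pvFresh us vis = [] := by
  induction us with
  | nil => simp [pvFresh]
  | cons u us ih =>
    have hc : vis.contains u = true := by simpa using h u (by simp)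
    simp only [pvFresh, hc, if_true]
    exact ih fun x hx => h x (List.mem_cons_of_mem _ hx)

theorem pv_freshLayer_nil (adj : PySem.Dict Int (List Int)) (cur vis : List Int)
    (h : ∀ v ∈ cur, ∀ u ∈ adj.getD v [], u ∈ vis) : pvFreshLayer adj cur vis = [] := by
  induction cur with
  | nil => simp [pvFreshLayer]
  | cons v vs ih =>
    have h0 : pvFresh (adj.getD v []) vis = [] := pv_fresh_nil _ _ (h v (by simp))
    simp only [pvFreshLayer, h0, List.append_nil, List.nil_append]
    exact ih fun w hw => h w (List.mem_cons_of_mem _ hw)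

theorem pv_cap_step (E vis nx : List Int) (hE : E.Nodup) (hnd : nx.Nodup)
    (hdisj : ∀ x ∈ nx, x ∉ vis) (hsub : ∀ x ∈ nx, x ∈ E) :
    pvCap E (vis ++ nx) + nx.length ≤ pvCap E vis := by
  unfold pvCap
  have hsplit : E.filter (fun u => !((vis ++ nx).contains u))
      = (E.filter (fun u => !(vis.contains u))).filter (fun u => !(nx.contains u)) := by
    rw [List.filter_filter]
    apply List.filter_congr
    intro x _
    by_cases h1 : x ∈ vis <;> by_cases h2 : x ∈ nx <;> simp [h1, h2]
  rw [hsplit]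
  set S := E.filter (fun u => !(vis.contains u)) with hS
  have hSsub : ∀ x ∈ nx, x ∈ S := by
    intro x hx
    rw [hS, List.mem_filter]
    exact ⟨hsub x hx, by simpa using hdisj x hx⟩
  have hlen : nx.length ≤ (S.filter (fun u => nx.contains u)).length := by
    have : nx.Subperm (S.filter (fun u => nx.contains u)) := by
      apply List.subperm_of_subset hnd
      intro x hx
      rw [List.mem_filter]
      exact ⟨hSsub x hx, by simpa using hx⟩
    exact this.length_le
  have htot : (S.filter (fun u => nx.contains u)).length
      + (S.filter (fun u => !(nx.contains u))).length = S.length := by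
    exact (List.length_eq_length_filter_add (fun u => nx.contains u)).symm
  omega

theorem pv_ghost_layer (adj : PySem.Dict Int (List Int)) (cur : List Int) (f : Nat)
    (nxt vis : List Int) (d : Int) :
    pvGhost adj (cur.length + f) (cur.map (fun v => (v, d)) ++ nxt.map (fun v => (v, d + 1))) vis
      = (pvFreshLayer adj cur vis).map (fun u => (u, d + 1)) ++
        pvGhost adj f ((nxt ++ pvFreshLayer adj cur vis).map (fun v => (v, d + 1)))
          (vis ++ pvFreshLayer adj cur vis) := by
  induction cur generalizing nxt vis with
  | nil => simp [pvFreshLayer, pv_ghost_nil]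
  | cons v vs ih =>
    have harith : (v :: vs).length + f = (vs.length + f) + 1 := by simp; omega
    rw [harith]
    simp only [List.map_cons, List.cons_append, pvGhost]
    have hq : (vs.map (fun v => (v, d)) ++ nxt.map (fun v => (v, d + 1)))
        ++ (pvFresh (adj.getD v []) vis).map (fun u => (u, d + 1))
        = vs.map (fun v => (v, d))
          ++ (nxt ++ pvFresh (adj.getD v []) vis).map (fun v => (v, d + 1)) := by
      simp [List.append_assoc]
    rw [hq, ih]
    simp only [pvFreshLayer]
    simp [List.append_assoc]

theorem pv_ghost_layers (adj : PySem.Dict Int (List Int)) (E : List Int) (hE : E.Nodup)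
    (hcand : ∀ v u, u ∈ adj.getD v [] → u ∈ E) :
    ∀ (f : Nat) (fuel : Nat) (cur vis : List Int) (d : Int),
      cur.length + pvCap E vis ≤ fuel → pvCap E vis < f →
      pvGhost adj fuel (cur.map (fun v => (v, d))) vis
        = pvTagFlat (d + 1) (pvLayersRest adj f cur vis) := by
  intro f
  induction f using Nat.strong_induction_on with
  | _ f IH =>
    intro fuel cur vis d h1 h2
    match f with
    | 0 => omega
    | f' + 1 =>
      have hfuel : fuel = cur.length + (fuel - cur.length) := by omega
      rw [hfuel]
      have h5 := pv_ghost_layer adj cur (fuel - cur.length) [] vis d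
      simp only [List.map_nil, List.append_nil, List.nil_append] at h5
      rw [h5]
      set nx := pvFreshLayer adj cur vis with hnx
      by_cases hn : nx = []
      · simp only [pvLayersRest, ← hnx, hn, if_true, pvTagFlat]
        simp [pv_ghost_nil]
      · simp only [pvLayersRest, ← hnx, hn, if_false, pvTagFlat]
        obtain ⟨hnd, hprop⟩ := pv_freshLayer_spec adj cur vis
        rw [← hnx] at hnd hprop
        have hcap : pvCap E (vis ++ nx) + nx.length ≤ pvCap E vis := by
          apply pv_cap_step E vis nx hE hnd (fun x hx => (hprop x hx).1)
          intro x hx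
          obtain ⟨-, w, -, hw⟩ := hprop x hx
          exact hcand w x hw
        have hlen : 1 ≤ nx.length := List.length_pos_of_ne_nil hn
        rw [IH f' (by omega) (fuel - cur.length) nx (vis ++ nx) (d + 1) (by omega) (by omega)]

theorem pv_adj_mem (edges : List (Int × Int × Int)) (v u : Int)
    (h : u ∈ (pvAdjA edges).getD v []) : u ∈ pvEp edges := by
  have hstep : ∀ (d0 : PySem.Dict Int (List Int)) (e : Int × Int × Int) (v u : Int),
      u ∈ ((PySem.Dict.modify d0 e.1 [] (fun l => l ++ [e.2.1])).modify e.2.1 []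
        (fun l => l ++ [e.1])).getD v [] →
      u ∈ d0.getD v [] ∨ u = e.1 ∨ u = e.2.1 := by
    intro d0 e v u h
    rw [PySem.Dict.getD_modify] at h
    split_ifs at h with hv1
    · rcases List.mem_append.mp h with h1 | h1
      · rw [PySem.Dict.getD_modify] at h1
        split_ifs at h1 with hv2
        · rcases List.mem_append.mp h1 with h2 | h2
          · exact Or.inl (by rw [hv1, hv2]; exact h2)
          · simp at h2; exact Or.inr (Or.inr h2)
        · exact Or.inl (by rw [hv1]; exact h1)
      · simp at h1; exact Or.inr (Or.inl h1)
    · rw [PySem.Dict.getD_modify] at h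
      split_ifs at h with hv2
      · rcases List.mem_append.mp h with h1 | h1
        · exact Or.inl (by rw [hv2]; exact h1)
        · simp at h1; exact Or.inr (Or.inr h1)
      · exact Or.inl h
  have main : ∀ (es : List (Int × Int × Int)) (d0 : PySem.Dict Int (List Int)) (v u : Int),
      u ∈ (es.foldl (fun d e =>
        (PySem.Dict.modify d e.1 [] (fun l => l ++ [e.2.1])).modify e.2.1 [] (fun l => l ++ [e.1]))
        d0).getD v [] → u ∈ d0.getD v [] ∨ u ∈ pvEp es := by
    intro es
    induction es with
    | nil => intro d0 v u h; simp at h; exact Or.inl h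
    | cons e es ih =>
      intro d0 v u h
      rw [List.foldl_cons] at h
      rcases ih _ v u h with h' | h'
      · rcases hstep d0 e v u h' with h'' | h'' | h''
        · exact Or.inl h''
        · exact Or.inr (by simp [pvEp, h''])
        · exact Or.inr (by simp [pvEp, h''])
      · exact Or.inr (by simp only [pvEp, List.flatMap_cons] at h' ⊢; exact List.mem_append_right _ h')
  rcases main edges PySem.Dict.empty v u (by simpa [pvAdjA] using h) with h' | h'
  · simp at h'
  · exact h'

theorem pv_adj_key (edges : List (Int × Int × Int)) (v : Int)
    (h : (pvAdjA edges).getD v [] ≠ []) : v ∈ pvEp edges := by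
  have hstep : ∀ (d0 : PySem.Dict Int (List Int)) (e : Int × Int × Int) (v : Int),
      ((PySem.Dict.modify d0 e.1 [] (fun l => l ++ [e.2.1])).modify e.2.1 []
        (fun l => l ++ [e.1])).getD v [] ≠ [] →
      d0.getD v [] ≠ [] ∨ v = e.1 ∨ v = e.2.1 := by
    intro d0 e v h
    rw [PySem.Dict.getD_modify] at h
    split_ifs at h with hv1
    · exact Or.inr (Or.inr hv1)
    · rw [PySem.Dict.getD_modify] at h
      split_ifs at h with hv2
      · exact Or.inr (Or.inl hv2)
      · exact Or.inl h
  have main : ∀ (es : List (Int × Int × Int)) (d0 : PySem.Dict Int (List Int)) (v : Int),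
      (es.foldl (fun d e =>
        (PySem.Dict.modify d e.1 [] (fun l => l ++ [e.2.1])).modify e.2.1 [] (fun l => l ++ [e.1]))
        d0).getD v [] ≠ [] → d0.getD v [] ≠ [] ∨ v ∈ pvEp es := by
    intro es
    induction es with
    | nil => intro d0 v h; simp at h; exact Or.inl h
    | cons e es ih =>
      intro d0 v h
      rw [List.foldl_cons] at h
      rcases ih _ v h with h' | h'
      · rcases hstep d0 e v h' with h'' | h'' | h''
        · exact Or.inl h''
        · exact Or.inr (by simp [pvEp, h''])
        · exact Or.inr (by simp [pvEp, h''])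
      · exact Or.inr (by simp only [pvEp, List.flatMap_cons] at h' ⊢; exact List.mem_append_right _ h')
  rcases main edges PySem.Dict.empty v (by simpa [pvAdjA] using h) with h' | h'
  · simp at h'
  · exact h'

theorem pv_loopA_eq (adj : PySem.Dict Int (List Int)) (n : Int) (E : List Int) (hE : E.Nodup)
    (hcand : ∀ v u, u ∈ adj.getD v [] → u ∈ E)
    (U : List Int) (hUcand : ∀ v u, u ∈ adj.getD v [] → u ∈ U)
    (hUlen : (U.length : Int) ≤ n) :
    ∀ (f : Nat) (cur vis : List Int) (acc : List (List Int)),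
      vis.Nodup → (∀ x ∈ vis, x ∈ U) →
      PySem.List.pyGetD acc (-1) [] = cur → pvCap E vis < f →
      pvLoopA adj n f vis acc = acc ++ pvLayersRest adj f cur vis := by
  intro f
  induction f with
  | zero => intro cur vis acc _ _ _ hcap; omega
  | succ f ih =>
    intro cur vis acc hnd hvr hlast hcap
    rw [pvLoopA]
    by_cases hlt : (vis.length : Int) < n
    · rw [if_pos hlt, hlast, pv_layer_fold]
      set nx := pvFreshLayer adj cur vis with hnx
      by_cases hn : nx = []
      · simp only [List.nil_append, hn, if_true, pvLayersRest, ← hnx]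
        simp
      · simp only [List.nil_append, hn, if_false, pvLayersRest, ← hnx]
        obtain ⟨hnd2, hprop⟩ := pv_freshLayer_spec adj cur vis
        rw [← hnx] at hnd2 hprop
        have hcapstep : pvCap E (vis ++ nx) + nx.length ≤ pvCap E vis := by
          apply pv_cap_step E vis nx hE hnd2 (fun x hx => (hprop x hx).1)
          intro x hx
          obtain ⟨-, w, -, hw⟩ := hprop x hx
          exact hcand w x hw
        have hlen : 1 ≤ nx.length := List.length_pos_of_ne_nil hn
        rw [ih nx (vis ++ nx) (acc ++ [nx]) ?_ ?_ ?_ (by omega)]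
        · simp
        · exact List.Nodup.append hnd hnd2 (fun x hx1 hx2 => (hprop x hx2).1 hx1)
        · intro x hx
          rcases List.mem_append.mp hx with hx' | hx'
          · exact hvr x hx'
          · obtain ⟨-, w, -, hw⟩ := hprop x hx'
            exact hUcand w x hw
        · exact PySem.List.pyGetD_neg_one_append_singleton acc nx []
    · rw [if_neg hlt]
      have hvsub : vis.Subperm U := List.subperm_of_subset hnd hvr
      have hlen1 : vis.length ≤ U.length := hvsub.length_le
      have hperm : vis.Perm U := by
        apply hvsub.perm_of_length_le
        omega
      have hall : ∀ x ∈ U, x ∈ vis := fun x hx => hperm.symm.subset hx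
      have hnil : pvFreshLayer adj cur vis = [] := by
        apply pv_freshLayer_nil
        intro v hv u hu
        exact hall u (hUcand v u hu)
      rw [pvLayersRest]
      simp [hnil]

theorem pv_layersRest_ne_nil (adj : PySem.Dict Int (List Int)) (f : Nat) (cur vis : List Int) :
    ∀ l ∈ pvLayersRest adj f cur vis, l ≠ [] := by
  induction f generalizing cur vis with
  | zero => simp [pvLayersRest]
  | succ f ih =>
    rw [pvLayersRest]
    by_cases hn : pvFreshLayer adj cur vis = []
    · simp [hn]
    · simp only [hn, if_false]
      intro l hl
      rcases List.mem_cons.mp hl with rfl | hl'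
      · exact hn
      · exact ih _ _ l hl'

theorem pv_tagFlat_fst (L : List (List Int)) (d : Int) :
    (pvTagFlat d L).map Prod.fst = L.flatten := by
  induction L generalizing d with
  | nil => simp [pvTagFlat]
  | cons l ls ih =>
    rw [pvTagFlat, List.map_append, List.map_map, ih]
    simp [Function.comp_def]

theorem pv_tagFlat_snd_lt (L : List (List Int)) (d k : Int) (h : k < d) :
    ((pvTagFlat d L).map Prod.snd).count k = 0 := by
  induction L generalizing d with
  | nil => simp [pvTagFlat]
  | cons l ls ih =>
    rw [pvTagFlat]
    rw [List.map_append, List.count_append, List.map_map]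
    have h1 : (l.map (Prod.snd ∘ fun u => (u, d))).count k = 0 := by
      apply List.count_eq_zero.mpr
      intro hk
      rcases List.mem_map.mp hk with ⟨x, -, hx⟩
      simp at hx
      omega
    rw [h1, ih (d + 1) (by omega)]

theorem pv_tagFlat_count (L : List (List Int)) (d : Int) (i : Nat) (hi : i < L.length) :
    ((pvTagFlat d L).map Prod.snd).count (d + i) = L[i].length := by
  induction L generalizing d i with
  | nil => simp at hi
  | cons l ls ih =>
    rw [pvTagFlat, List.map_append, List.count_append, List.map_map]
    match i with
    | 0 =>
      have h1 : (l.map (Prod.snd ∘ fun u => (u, d))).count (d + (0 : Nat)) = l.length := by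
        have : (l.map (Prod.snd ∘ fun u => (u, d))) = l.map (fun _ => d) := by
          simp [Function.comp_def]
        rw [this]
        simp [List.count_eq_length.mpr]
      have h2 : ((pvTagFlat (d + 1) ls).map Prod.snd).count (d + (0 : Nat)) = 0 := by
        apply pv_tagFlat_snd_lt
        omega
      simp only [h1, h2]
      simp
    | i + 1 =>
      have h1 : (l.map (Prod.snd ∘ fun u => (u, d))).count (d + (i + 1 : Nat)) = 0 := by
        apply List.count_eq_zero.mpr
        intro hk
        rcases List.mem_map.mp hk with ⟨x, -, h⟩
        simp at h
        omega
      have h2 := ih (d + 1) i (by simpa using hi)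
      rw [h1]
      have harg : d + ((i + 1 : Nat) : Int) = (d + 1) + (i : Nat) := by push_cast; ring
      rw [harg, h2]
      simp

theorem pv_tagFlat_snd_bounds (L : List (List Int)) (d : Int) :
    ∀ k ∈ (pvTagFlat d L).map Prod.snd, d ≤ k ∧ k < d + L.length := by
  induction L generalizing d with
  | nil => simp [pvTagFlat]
  | cons l ls ih =>
    intro k hk
    rw [pvTagFlat, List.map_append, List.map_map] at hk
    have hlen : ((l :: ls).length : Int) = (ls.length : Int) + 1 := by simp
    rcases List.mem_append.mp hk with h1 | h1
    · rcases List.mem_map.mp h1 with ⟨x, -, hx⟩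
      simp at hx
      omega
    · obtain ⟨hk1, hk2⟩ := ih (d + 1) k h1
      omega

theorem pv_tagFlat_last_mem (L : List (List Int)) (d : Int) (hne : L ≠ [])
    (hmem : ∀ l ∈ L, l ≠ []) : (d + L.length - 1) ∈ (pvTagFlat d L).map Prod.snd := by
  induction L generalizing d with
  | nil => exact absurd rfl hne
  | cons l ls ih =>
    rw [pvTagFlat, List.map_append, List.map_map]
    by_cases hls : ls = []
    · subst hls
      have h0 : l ≠ [] := hmem l (by simp)
      apply List.mem_append_left
      apply List.mem_map.mpr
      obtain ⟨x, hx⟩ := List.exists_mem_of_ne_nil l h0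
      refine ⟨x, hx, ?_⟩
      simp
    · apply List.mem_append_right
      have := ih (d + 1) hls (fun m hm => hmem m (List.mem_cons_of_mem _ hm))
      have harith : d + ((l :: ls).length : Int) - 1 = (d + 1) + (ls.length : Int) - 1 := by
        simp; ring
      rw [harith]
      exact this

theorem pv_tagFlat_max (L : List (List Int)) (d : Int) (hne : L ≠ []) (hmem : ∀ l ∈ L, l ≠ []) :
    PySem.List.max? ((pvTagFlat d L).map Prod.snd) (fun x => x) = some (d + L.length - 1) := by
  have hnonempty : (pvTagFlat d L).map Prod.snd ≠ [] := by
    intro hcon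
    have := pv_tagFlat_last_mem L d hne hmem
    rw [hcon] at this
    simp at this
  cases hmx : PySem.List.max? ((pvTagFlat d L).map Prod.snd) (fun x => x) with
  | none => exact absurd ((PySem.List.max?_eq_none_iff _ _).mp hmx) hnonempty
  | some m =>
    have h1 := PySem.List.max?_mem hmx
    have h2 := PySem.List.max?_isMax hmx
    have h3 := pv_tagFlat_snd_bounds L d m h1
    have h4 := h2 _ (pv_tagFlat_last_mem L d hne hmem)
    simp only [Option.some.injEq]
    omega

theorem pv_tagFlat_filter_eq (L : List (List Int)) (d : Int) (i : Nat) (hi : i < L.length) :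
    ((pvTagFlat d L).filter (fun p => p.2 == d + i)).map (fun p => p.1) = L[i] := by
  induction L generalizing d i with
  | nil => simp at hi
  | cons l ls ih =>
    rw [pvTagFlat, List.filter_append, List.map_append]
    match i with
    | 0 =>
      have h1 : (l.map (fun u => (u, d))).filter (fun p => p.2 == d + (0 : Nat))
          = l.map (fun u => (u, d)) := by
        apply List.filter_eq_self.mpr
        intro p hp
        rcases List.mem_map.mp hp with ⟨x, -, rfl⟩
        simp
      have h2 : (pvTagFlat (d + 1) ls).filter (fun p => p.2 == d + (0 : Nat)) = [] := by
        apply List.filter_eq_nil_iff.mpr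
        intro p hp
        have hb := pv_tagFlat_snd_bounds ls (d + 1) p.2 (List.mem_map_of_mem hp)
        simp
        omega
      rw [h1, h2]
      simp [List.map_map, Function.comp_def]
    | i + 1 =>
      have h1 : (l.map (fun u => (u, d))).filter (fun p => p.2 == d + (i + 1 : Nat)) = [] := by
        apply List.filter_eq_nil_iff.mpr
        intro p hp
        rcases List.mem_map.mp hp with ⟨x, -, rfl⟩
        simp
        omega
      rw [h1]
      have harg : ∀ (p : Int × Int), (p.2 == d + (i + 1 : Nat)) = (p.2 == (d + 1) + (i : Nat)) := by
        intro p
        have : d + ((i + 1 : Nat) : Int) = (d + 1) + (i : Nat) := by push_cast; ring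
        rw [this]
      simp only [harg]
      rw [ih (d + 1) i (by simpa using hi)]
      simp

theorem pv_tagFlat_filter_lt (L : List (List Int)) (d : Int) (i : Nat) (hi : i ≤ L.length) :
    ((pvTagFlat d L).filter (fun p => decide (p.2 < d + i))).map (fun p => p.1)
      = (L.take i).flatten := by
  induction L generalizing d i with
  | nil => simp [pvTagFlat]
  | cons l ls ih =>
    rw [pvTagFlat, List.filter_append, List.map_append]
    match i with
    | 0 =>
      have h1 : (l.map (fun u => (u, d))).filter (fun p => decide (p.2 < d + (0 : Nat))) = [] := by
        apply List.filter_eq_nil_iff.mpr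
        intro p hp
        rcases List.mem_map.mp hp with ⟨x, -, rfl⟩
        simp
      have h2 : (pvTagFlat (d + 1) ls).filter (fun p => decide (p.2 < d + (0 : Nat))) = [] := by
        apply List.filter_eq_nil_iff.mpr
        intro p hp
        have hb := pv_tagFlat_snd_bounds ls (d + 1) p.2 (List.mem_map_of_mem hp)
        simp
        omega
      rw [h1, h2]
      simp
    | i + 1 =>
      have h1 : (l.map (fun u => (u, d))).filter (fun p => decide (p.2 < d + (i + 1 : Nat)))
          = l.map (fun u => (u, d)) := by
        apply List.filter_eq_self.mpr
        intro p hp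
        rcases List.mem_map.mp hp with ⟨x, -, rfl⟩
        simp
      have harg : ∀ (p : Int × Int), (decide (p.2 < d + (i + 1 : Nat)) : Bool)
          = decide (p.2 < (d + 1) + (i : Nat)) := by
        intro p
        have : d + ((i + 1 : Nat) : Int) = (d + 1) + (i : Nat) := by push_cast; ring
        rw [this]
      rw [h1]
      simp only [harg]
      rw [ih (d + 1) i (by simpa using hi)]
      simp [List.map_map, Function.comp_def]

theorem pv_tagFlat_filter_gt (L : List (List Int)) (d : Int) (i : Nat) :
    ((pvTagFlat d L).filter (fun p => decide (d + i < p.2))).map (fun p => p.1)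
      = (L.drop (i + 1)).flatten := by
  induction L generalizing d i with
  | nil => simp [pvTagFlat]
  | cons l ls ih =>
    rw [pvTagFlat, List.filter_append, List.map_append]
    have h1 : (l.map (fun u => (u, d))).filter (fun p => decide (d + (i : Nat) < p.2)) = [] := by
      apply List.filter_eq_nil_iff.mpr
      intro p hp
      rcases List.mem_map.mp hp with ⟨x, -, rfl⟩
      simp
    rw [h1]
    match i with
    | 0 =>
      have h2 : (pvTagFlat (d + 1) ls).filter (fun p => decide (d + (0 : Nat) < p.2))
          = pvTagFlat (d + 1) ls := by
        apply List.filter_eq_self.mpr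
        intro p hp
        have hb := pv_tagFlat_snd_bounds ls (d + 1) p.2 (List.mem_map_of_mem hp)
        simp
        omega
      rw [h2]
      simp [pv_tagFlat_fst]
    | i + 1 =>
      have harg : ∀ (p : Int × Int), (decide (d + (i + 1 : Nat) < p.2) : Bool)
          = decide ((d + 1) + (i : Nat) < p.2) := by
        intro p
        have : d + ((i + 1 : Nat) : Int) = (d + 1) + (i : Nat) := by push_cast; ring
        rw [this]
      simp only [harg]
      rw [ih (d + 1) i]
      simp

theorem pv_argmin (ds : List Int) (f g : Int → Int) (b : Int)
    (hfg : ∀ i ∈ ds, f i = g i) (hb : f b = g b) :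
    (ds.foldl (fun (p : Int × Int) i => if f i < p.1 then (f i, i) else p) (f b, b)).2
      = ds.foldl (fun b' dd => if g dd < g b' then dd else b') b := by
  induction ds generalizing b with
  | nil => simp
  | cons i ds ih =>
    have hfi : f i = g i := hfg i (by simp)
    have hrest : ∀ j ∈ ds, f j = g j := fun j hj => hfg j (List.mem_cons_of_mem _ hj)
    rw [List.foldl_cons, List.foldl_cons]
    by_cases hcmp : f i < f b
    · rw [if_pos hcmp, if_pos (by rw [← hfi, ← hb]; exact hcmp)]
      exact ih i hrest hfi
    · rw [if_neg hcmp, if_neg (by rw [← hfi, ← hb]; exact hcmp)]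
      exact ih b hrest hb

theorem pv_argmin_mem (ds : List Int) (f : Int → Int) (b : Int) :
    (ds.foldl (fun (p : Int × Int) i => if f i < p.1 then (f i, i) else p) (f b, b)).2 ∈ b :: ds := by
  induction ds generalizing b with
  | nil => simp
  | cons i ds ih =>
    rw [List.foldl_cons]
    by_cases hcmp : f i < f b
    · rw [if_pos hcmp]
      have := ih i
      rcases List.mem_cons.mp this with h | h
      · rw [h]; simp
      · simp [h]
    · rw [if_neg hcmp]
      have := ih b
      rcases List.mem_cons.mp this with h | h
      · rw [h]; simp
      · simp [h]

theorem pv_foldl_update (Ls : List (List Int)) (s : PySem.Set Int) :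
    Ls.foldl (fun s l => PySem.Set.update s l) s = PySem.Set.update s Ls.flatten := by
  induction Ls generalizing s with
  | nil => simp [PySem.Set.update]
  | cons l ls ih =>
    rw [List.foldl_cons, ih, List.flatten_cons]
    simp [PySem.Set.update, List.foldl_append]

theorem pv_ep_length (edges : List (Int × Int × Int)) : (pvEp edges).length = 2 * edges.length := by
  induction edges with
  | nil => simp [pvEp]
  | cons e es ih => simp [pvEp] at ih ⊢; omega

theorem pv_endgame (L : List (List Int)) (mi : Int) (h1 : 1 ≤ mi)
    (h2 : mi < (L.length : Int) - 1) :
    (PySem.Set.ofList (PySem.List.pyGetD L mi []),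
     (PySem.List.pyRange 0 mi 1).foldl
       (fun s i => PySem.Set.update s (PySem.List.pyGetD L i [])) PySem.Set.empty,
     (PySem.List.pyRange (mi + 1) ((L.length : Int)) 1).foldl
       (fun s i => PySem.Set.update s (PySem.List.pyGetD L i [])) PySem.Set.empty)
    = (PySem.Set.ofList (((pvTagFlat 0 L).filter (fun p => p.2 == mi)).map (fun p => p.1)),
       PySem.Set.ofList (((pvTagFlat 0 L).filter (fun p => decide (p.2 < mi))).map (fun p => p.1)),
       PySem.Set.ofList (((pvTagFlat 0 L).filter (fun p => decide (mi < p.2))).map (fun p => p.1))) := by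
  have hilen : mi.toNat < L.length := by omega
  have e1 : (0 : Int) + (mi.toNat : Int) = mi := by omega
  have hfe := pv_tagFlat_filter_eq L 0 mi.toNat hilen
  rw [e1] at hfe
  have hflt := pv_tagFlat_filter_lt L 0 mi.toNat (by omega)
  rw [e1] at hflt
  have hfgt := pv_tagFlat_filter_gt L 0 mi.toNat
  rw [e1] at hfgt
  rw [hfe, hflt, hfgt]
  refine Prod.ext ?_ (Prod.ext ?_ ?_)
  · -- separator: the minimal layer itself
    show PySem.Set.ofList (PySem.List.pyGetD L mi []) = PySem.Set.ofList L[mi.toNat]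
    rw [PySem.List.pyGetD_eq_getElem L [] (by omega) (by omega)]
  · -- interior: the flattened layers before it
    show ((PySem.List.pyRange 0 mi 1).foldl
      (fun s i => PySem.Set.update s (PySem.List.pyGetD L i [])) PySem.Set.empty) = _
    have hcongr : (PySem.List.pyRange 0 mi 1).foldl
        (fun s i => PySem.Set.update s (PySem.List.pyGetD L i [])) PySem.Set.empty
        = (PySem.List.pyRange 0 mi 1).foldl
          (fun s i => PySem.Set.update s (PySem.List.pyGetD (L.take mi.toNat) i []))
          PySem.Set.empty := by
      apply PySem.List.foldl_congr_mem
      intro acc j hj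
      have hjb := PySem.List.mem_pyRange_one.mp hj
      have hjt : j < ((L.take mi.toNat).length : Int) := by
        rw [List.length_take]
        omega
      rw [PySem.List.pyGetD_eq_getElem L [] hjb.1 (by omega),
        PySem.List.pyGetD_eq_getElem (L.take mi.toNat) [] hjb.1 hjt,
        List.getElem_take]
    rw [hcongr]
    have hrange_eq : PySem.List.pyRange 0 mi 1
        = PySem.List.pyRange 0 (((L.take mi.toNat).length : Nat) : Int) 1 := by
      rw [List.length_take]
      congr 1
      omega
    rw [hrange_eq, PySem.List.foldl_pyRange_zero_pyGetD' (L.take mi.toNat) []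
      (fun s l => PySem.Set.update s l) PySem.Set.empty]
    rw [pv_foldl_update]
    show PySem.Set.update [] (L.take mi.toNat).flatten = _
    rw [PySem.Set.update_nil_left]
  · -- exterior: the flattened layers after it
    show ((PySem.List.pyRange (mi + 1) ((L.length : Int)) 1).foldl
      (fun s i => PySem.Set.update s (PySem.List.pyGetD L i [])) PySem.Set.empty) = _
    rw [PySem.List.foldl_pyRange_pyGetD' L [] (fun s l => PySem.Set.update s l)
      PySem.Set.empty (by omega : (0 : Int) ≤ mi + 1)]
    rw [pv_foldl_update]
    show PySem.Set.update [] (L.drop (mi + 1).toNat).flatten = _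
    rw [PySem.Set.update_nil_left]
    rw [show (mi + 1).toNat = mi.toNat + 1 by omega]

-- the two port bodies after source resolution: common tail once the layer
-- decomposition of A's loop is known
theorem pv_core_tail (n : Int) (edges : List (Int × Int × Int)) (src : Int)
    (hlayers0 : pvLoopA (pvAdjA edges) n (2 * edges.length + 2) [src] [[src]]
      = [[src]] ++ pvLayersRest (pvAdjA edges) (2 * edges.length + 2) [src] [src]) :
    (let adj := pvAdjA edges
     let layers := pvLoopA adj n (2 * edges.length + 2) [src] [[src]]
     if (layers.length : Int) < 3 then
       (PySem.Set.empty, PySem.Set.ofList (PySem.List.pyRange 0 n 1), PySem.Set.empty)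
     else
       let st := (PySem.List.pyRange 1 ((layers.length : Int) - 1) 1).foldl
         (fun (p : Int × Int) i =>
           if ((PySem.List.pyGetD layers i []).length : Int) < p.1 then
             (((PySem.List.pyGetD layers i []).length : Int), i)
           else p)
         (((PySem.List.pyGetD layers 1 []).length : Int), 1)
       let separator := PySem.Set.ofList (PySem.List.pyGetD layers st.2 [])
       let interior := (PySem.List.pyRange 0 st.2 1).foldl
         (fun s i => PySem.Set.update s (PySem.List.pyGetD layers i [])) PySem.Set.empty
       let exterior := (PySem.List.pyRange (st.2 + 1) (layers.length : Int) 1).foldl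
         (fun s i => PySem.Set.update s (PySem.List.pyGetD layers i [])) PySem.Set.empty
       (separator, interior, exterior))
    = (let adj := pvAdjA edges
       let dist := pvBfsB adj (2 * edges.length + 2) [(src, 0)] (PySem.Dict.empty.insert src 0)
       let maxd := (PySem.List.max? dist.values (fun x => x)).getD 0
       if maxd < 2 then
         (PySem.Set.empty, PySem.Set.ofList (PySem.List.pyRange 0 n 1), PySem.Set.empty)
       else
         let width := dist.values.foldl (fun w d => PySem.Dict.modify w d 0 (fun c => c + 1))
           (PySem.Dict.empty : PySem.Dict Int Int)
         let best := (PySem.List.pyRange 2 maxd 1).foldl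
           (fun b d => if width.getD d 0 < width.getD b 0 then d else b) 1
         (PySem.Set.ofList ((dist.items.filter (fun p => p.2 == best)).map (fun p => p.1)),
          PySem.Set.ofList ((dist.items.filter (fun p => decide (p.2 < best))).map (fun p => p.1)),
          PySem.Set.ofList ((dist.items.filter (fun p => decide (best < p.2))).map (fun p => p.1)))) := by
  simp only []
  set adj := pvAdjA edges with hadj
  have hEnd : ((pvEp edges).dedup).Nodup := List.nodup_dedup _
  have hcandE : ∀ v u, u ∈ adj.getD v [] → u ∈ (pvEp edges).dedup :=
    fun v u hu => List.mem_dedup.mpr (pv_adj_mem edges v u hu)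
  have hcapF : pvCap ((pvEp edges).dedup) [src] ≤ 2 * edges.length := by
    have h1 : pvCap ((pvEp edges).dedup) [src] ≤ ((pvEp edges).dedup).length :=
      List.length_filter_le _ _
    have h2 : ((pvEp edges).dedup).length ≤ (pvEp edges).length :=
      (List.dedup_sublist _).length_le
    have h3 := pv_ep_length edges
    omega
  have hk0 : (PySem.Dict.empty.insert src (0 : Int)).keys = [src] := by
    rw [PySem.Dict.keys_insert_of_not_contains _ _ (PySem.Dict.contains_empty _)]
    simp [PySem.Dict.keys, PySem.Dict.empty]
  have hi0 : (PySem.Dict.empty.insert src (0 : Int)).items = [(src, 0)] := by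
    rw [PySem.Dict.items_insert_of_not_contains _ _ (PySem.Dict.contains_empty _)]
    simp [PySem.Dict.empty]
  have hFsucc : 2 * edges.length + 2 = (2 * edges.length + 1) + 1 := rfl
  have hlayers := hlayers0
  set Ls := pvLayersRest adj (2 * edges.length + 2) [src] [src] with hLs
  have hLcons : [[src]] ++ Ls = [src] :: Ls := by simp
  rw [hLcons] at hlayers
  set L : List (List Int) := [src] :: Ls with hL
  have hitems : (pvBfsB adj (2 * edges.length + 2) [(src, 0)]
      (PySem.Dict.empty.insert src 0)).items = pvTagFlat 0 L := by
    rw [pv_bfs_ghost, hk0, hi0]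
    have hq : [((src : Int), (0 : Int))] = [src].map (fun v => (v, (0 : Int))) := by simp
    rw [hq, pv_ghost_layers adj ((pvEp edges).dedup) hEnd hcandE
      (2 * edges.length + 2) (2 * edges.length + 2) [src] [src] 0 (by simp; omega) (by omega)]
    rw [hL, pvTagFlat]
  have hvals : (pvBfsB adj (2 * edges.length + 2) [(src, 0)]
      (PySem.Dict.empty.insert src 0)).values = (pvTagFlat 0 L).map Prod.snd := by
    simp [PySem.Dict.values, hitems]
  have hlne : ∀ l ∈ L, l ≠ [] := by
    intro l hl
    rcases List.mem_cons.mp hl with rfl | hl'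
    · simp
    · exact pv_layersRest_ne_nil adj _ _ _ l hl'
  have hmax : PySem.List.max? ((pvTagFlat 0 L).map Prod.snd) (fun x => x)
      = some ((L.length : Int) - 1) := by
    rw [pv_tagFlat_max L 0 (by simp) hlne]
    norm_num
  have hL1 : 1 ≤ L.length := by rw [hL]; simp
  rw [hlayers, hvals, hmax]
  simp only [Option.getD_some]
  by_cases hlen3 : (L.length : Int) < 3
  · rw [if_pos hlen3, if_pos (by omega)]
  · rw [if_neg hlen3, if_neg (by omega)]
    have hw : ∀ k : Int, ((((pvTagFlat 0 L).map Prod.snd).foldl (fun w d => PySem.Dict.modify w d 0 (fun c => c + 1)) (PySem.Dict.empty : PySem.Dict Int Int))).getD k 0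
        = (((pvTagFlat 0 L).map Prod.snd).count k : Int) := by
      intro k
      rw [PySem.Dict.getD_foldl_modify_add_one, PySem.Dict.getD_empty]
      omega
    have hfg_at : ∀ i : Int, 0 ≤ i → i < (L.length : Int) →
        ((PySem.List.pyGetD L i []).length : Int) = ((((pvTagFlat 0 L).map Prod.snd).foldl (fun w d => PySem.Dict.modify w d 0 (fun c => c + 1)) (PySem.Dict.empty : PySem.Dict Int Int))).getD i 0 := by
      intro i h0 h1
      have hcount := pv_tagFlat_count L 0 i.toNat (by omega)
      rw [show (0 : Int) + (i.toNat : Int) = i by omega] at hcount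
      rw [PySem.List.pyGetD_eq_getElem L [] h0 h1, hw, hcount]
    have hr1 : PySem.List.pyRange 1 ((L.length : Int) - 1) 1
        = 1 :: PySem.List.pyRange 2 ((L.length : Int) - 1) 1 := by
      rw [PySem.List.pyRange_one_cons (by omega)]
      norm_num
    rw [hr1, List.foldl_cons, if_neg (lt_irrefl _)]
    have hdsmem : ∀ i ∈ (PySem.List.pyRange 2 ((L.length : Int) - 1) 1), 0 ≤ i ∧ i < (L.length : Int) := by
      intro i hi
      have := PySem.List.mem_pyRange_one.mp hi
      omega
    have hbest : ((PySem.List.pyRange 2 ((L.length : Int) - 1) 1).foldl (fun (p : Int × Int) i =>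
        if ((PySem.List.pyGetD L i []).length : Int) < p.1 then
          (((PySem.List.pyGetD L i []).length : Int), i) else p)
        (((PySem.List.pyGetD L 1 []).length : Int), 1)).2
        = ((PySem.List.pyRange 2 ((L.length : Int) - 1) 1).foldl (fun b d => if ((((pvTagFlat 0 L).map Prod.snd).foldl (fun w d => PySem.Dict.modify w d 0 (fun c => c + 1)) (PySem.Dict.empty : PySem.Dict Int Int))).getD d 0 < ((((pvTagFlat 0 L).map Prod.snd).foldl (fun w d => PySem.Dict.modify w d 0 (fun c => c + 1)) (PySem.Dict.empty : PySem.Dict Int Int))).getD b 0 then d else b) 1) := by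
      apply pv_argmin _ _ _ 1
      · intro i hi
        exact hfg_at i (hdsmem i hi).1 (hdsmem i hi).2
      · exact hfg_at 1 (by omega) (by omega)
    have hmem := pv_argmin_mem (PySem.List.pyRange 2 ((L.length : Int) - 1) 1)
      (fun i => ((PySem.List.pyGetD L i []).length : Int)) 1
    rw [hbest] at hmem
    have hmib : 1 ≤ ((PySem.List.pyRange 2 ((L.length : Int) - 1) 1).foldl (fun b d => if ((((pvTagFlat 0 L).map Prod.snd).foldl (fun w d => PySem.Dict.modify w d 0 (fun c => c + 1)) (PySem.Dict.empty : PySem.Dict Int Int))).getD d 0 < ((((pvTagFlat 0 L).map Prod.snd).foldl (fun w d => PySem.Dict.modify w d 0 (fun c => c + 1)) (PySem.Dict.empty : PySem.Dict Int Int))).getD b 0 then d else b) 1) ∧ ((PySem.List.pyRange 2 ((L.length : Int) - 1) 1).foldl (fun b d => if ((((pvTagFlat 0 L).map Prod.snd).foldl (fun w d => PySem.Dict.modify w d 0 (fun c => c + 1)) (PySem.Dict.empty : PySem.Dict Int Int))).getD d 0 < ((((pvTagFlat 0 L).map Prod.snd).foldl (fun w d => PySem.Dict.modify w d 0 (fun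 c => c + 1)) (PySem.Dict.empty : PySem.Dict Int Int))).getD b 0 then d else b) 1) < (L.length : Int) - 1 := by
      rcases List.mem_cons.mp hmem with h | h
      · rw [h]; omega
      · have := PySem.List.mem_pyRange_one.mp h
        omega
    rw [hbest, hitems]
    exact pv_endgame L ((PySem.List.pyRange 2 ((L.length : Int) - 1) 1).foldl (fun b d => if ((((pvTagFlat 0 L).map Prod.snd).foldl (fun w d => PySem.Dict.modify w d 0 (fun c => c + 1)) (PySem.Dict.empty : PySem.Dict Int Int))).getD d 0 < ((((pvTagFlat 0 L).map Prod.snd).foldl (fun w d => PySem.Dict.modify w d 0 (fun c => c + 1)) (PySem.Dict.empty : PySem.Dict Int Int))).getD b 0 then d else b) 1) hmib.1 hmib.2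

-- a source that touches no edge: A stops after one layer, B's queue dies at once
theorem pv_core_nonnode (n : Int) (edges : List (Int × Int × Int)) (src : Int)
    (hsrc_ep : src ∉ pvEp edges) :
    (let adj := pvAdjA edges
     let layers := pvLoopA adj n (2 * edges.length + 2) (PySem.Set.ofList [src]) [[src]]
     if (layers.length : Int) < 3 then
       (PySem.Set.empty, PySem.Set.ofList (PySem.List.pyRange 0 n 1), PySem.Set.empty)
     else
       let st := (PySem.List.pyRange 1 ((layers.length : Int) - 1) 1).foldl
         (fun (p : Int × Int) i =>
           if ((PySem.List.pyGetD layers i []).length : Int) < p.1 then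
             (((PySem.List.pyGetD layers i []).length : Int), i)
           else p)
         (((PySem.List.pyGetD layers 1 []).length : Int), 1)
       let separator := PySem.Set.ofList (PySem.List.pyGetD layers st.2 [])
       let interior := (PySem.List.pyRange 0 st.2 1).foldl
         (fun s i => PySem.Set.update s (PySem.List.pyGetD layers i [])) PySem.Set.empty
       let exterior := (PySem.List.pyRange (st.2 + 1) (layers.length : Int) 1).foldl
         (fun s i => PySem.Set.update s (PySem.List.pyGetD layers i [])) PySem.Set.empty
       (separator, interior, exterior))
    = (let adj := pvAdjA edges
       let dist := pvBfsB adj (2 * edges.length + 2) [(src, 0)] (PySem.Dict.empty.insert src 0)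
       let maxd := (PySem.List.max? dist.values (fun x => x)).getD 0
       if maxd < 2 then
         (PySem.Set.empty, PySem.Set.ofList (PySem.List.pyRange 0 n 1), PySem.Set.empty)
       else
         let width := dist.values.foldl (fun w d => PySem.Dict.modify w d 0 (fun c => c + 1))
           (PySem.Dict.empty : PySem.Dict Int Int)
         let best := (PySem.List.pyRange 2 maxd 1).foldl
           (fun b d => if width.getD d 0 < width.getD b 0 then d else b) 1
         (PySem.Set.ofList ((dist.items.filter (fun p => p.2 == best)).map (fun p => p.1)),
          PySem.Set.ofList ((dist.items.filter (fun p => decide (p.2 < best))).map (fun p => p.1)),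
          PySem.Set.ofList ((dist.items.filter (fun p => decide (best < p.2))).map (fun p => p.1)))) := by
  simp only []
  set adj := pvAdjA edges with hadj
  have hofl : PySem.Set.ofList [src] = [src] := PySem.Set.ofList_eq_self_of_nodup _ (by simp)
  rw [hofl]
  have hk0 : (PySem.Dict.empty.insert src (0 : Int)).keys = [src] := by
    rw [PySem.Dict.keys_insert_of_not_contains _ _ (PySem.Dict.contains_empty _)]
    simp [PySem.Dict.keys, PySem.Dict.empty]
  have hi0 : (PySem.Dict.empty.insert src (0 : Int)).items = [(src, 0)] := by
    rw [PySem.Dict.items_insert_of_not_contains _ _ (PySem.Dict.contains_empty _)]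
    simp [PySem.Dict.empty]
  have hFsucc : 2 * edges.length + 2 = (2 * edges.length + 1) + 1 := rfl
  have hadj_src : adj.getD src [] = [] := by
    by_contra hne
    exact hsrc_ep (pv_adj_key edges src hne)
  have hlayers : pvLoopA adj n (2 * edges.length + 2) [src] [[src]] = [[src]] := by
    rw [hFsucc, pvLoopA]
    by_cases h1 : (([src] : List Int).length : Int) < n
    · rw [if_pos h1]
      have hlast : PySem.List.pyGetD [[src]] (-1) [] = [src] :=
        PySem.List.pyGetD_neg_one_append_singleton [] [src] []
      rw [hlast, pv_layer_fold]
      simp [pvFreshLayer, hadj_src, pvFresh]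
    · rw [if_neg h1]
  have hdist : (pvBfsB adj (2 * edges.length + 2) [(src, 0)]
      (PySem.Dict.empty.insert src 0)).items = [(src, 0)] := by
    rw [pv_bfs_ghost, hk0, hi0, hFsucc, pvGhost]
    simp [hadj_src, pvFresh, pv_ghost_nil]
  have hvals : (pvBfsB adj (2 * edges.length + 2) [(src, 0)]
      (PySem.Dict.empty.insert src 0)).values = [(0 : Int)] := by
    simp [PySem.Dict.values, hdist]
  rw [hlayers, hvals]
  have hm : (PySem.List.max? [(0 : Int)] (fun x => x)).getD 0 = 0 := by decide
  rw [hm]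
  norm_num

-- wrapper: restate pv_core_tail with A's literal `Set.ofList [src]` argument
theorem pv_core_tail' (n : Int) (edges : List (Int × Int × Int)) (src : Int)
    (hlayers0 : pvLoopA (pvAdjA edges) n (2 * edges.length + 2) [src] [[src]]
      = [[src]] ++ pvLayersRest (pvAdjA edges) (2 * edges.length + 2) [src] [src]) :
    (let adj := pvAdjA edges
     let layers := pvLoopA adj n (2 * edges.length + 2) (PySem.Set.ofList [src]) [[src]]
     if (layers.length : Int) < 3 then
       (PySem.Set.empty, PySem.Set.ofList (PySem.List.pyRange 0 n 1), PySem.Set.empty)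
     else
       let st := (PySem.List.pyRange 1 ((layers.length : Int) - 1) 1).foldl
         (fun (p : Int × Int) i =>
           if ((PySem.List.pyGetD layers i []).length : Int) < p.1 then
             (((PySem.List.pyGetD layers i []).length : Int), i)
           else p)
         (((PySem.List.pyGetD layers 1 []).length : Int), 1)
       let separator := PySem.Set.ofList (PySem.List.pyGetD layers st.2 [])
       let interior := (PySem.List.pyRange 0 st.2 1).foldl
         (fun s i => PySem.Set.update s (PySem.List.pyGetD layers i [])) PySem.Set.empty
       let exterior := (PySem.List.pyRange (st.2 + 1) (layers.length : Int) 1).foldl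
         (fun s i => PySem.Set.update s (PySem.List.pyGetD layers i [])) PySem.Set.empty
       (separator, interior, exterior))
    = (let adj := pvAdjA edges
       let dist := pvBfsB adj (2 * edges.length + 2) [(src, 0)] (PySem.Dict.empty.insert src 0)
       let maxd := (PySem.List.max? dist.values (fun x => x)).getD 0
       if maxd < 2 then
         (PySem.Set.empty, PySem.Set.ofList (PySem.List.pyRange 0 n 1), PySem.Set.empty)
       else
         let width := dist.values.foldl (fun w d => PySem.Dict.modify w d 0 (fun c => c + 1))
           (PySem.Dict.empty : PySem.Dict Int Int)
         let best := (PySem.List.pyRange 2 maxd 1).foldl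
           (fun b d => if width.getD d 0 < width.getD b 0 then d else b) 1
         (PySem.Set.ofList ((dist.items.filter (fun p => p.2 == best)).map (fun p => p.1)),
          PySem.Set.ofList ((dist.items.filter (fun p => decide (p.2 < best))).map (fun p => p.1)),
          PySem.Set.ofList ((dist.items.filter (fun p => decide (best < p.2))).map (fun p => p.1)))) := by
  have hofl : PySem.Set.ofList [src] = [src] := PySem.Set.ofList_eq_self_of_nodup _ (by simp)
  simp only [hofl]
  exact pv_core_tail n edges src hlayers0

-- the two port bodies after source resolution agree, for ANY resolved source
theorem pv_core (n : Int) (edges : List (Int × Int × Int)) (src : Int)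
    (hPre2 : (∀ e ∈ edges, 0 ≤ e.1 ∧ e.1 < n ∧ 0 ≤ e.2.1 ∧ e.2.1 < n) ∨
      (((edges.flatMap (fun e => [e.1, e.2.1])).dedup.length : Int) + 1 ≤ n) ∨
      src ∉ pvEp edges) :
    (let adj := pvAdjA edges
     let layers := pvLoopA adj n (2 * edges.length + 2) (PySem.Set.ofList [src]) [[src]]
     if (layers.length : Int) < 3 then
       (PySem.Set.empty, PySem.Set.ofList (PySem.List.pyRange 0 n 1), PySem.Set.empty)
     else
       let st := (PySem.List.pyRange 1 ((layers.length : Int) - 1) 1).foldl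
         (fun (p : Int × Int) i =>
           if ((PySem.List.pyGetD layers i []).length : Int) < p.1 then
             (((PySem.List.pyGetD layers i []).length : Int), i)
           else p)
         (((PySem.List.pyGetD layers 1 []).length : Int), 1)
       let separator := PySem.Set.ofList (PySem.List.pyGetD layers st.2 [])
       let interior := (PySem.List.pyRange 0 st.2 1).foldl
         (fun s i => PySem.Set.update s (PySem.List.pyGetD layers i [])) PySem.Set.empty
       let exterior := (PySem.List.pyRange (st.2 + 1) (layers.length : Int) 1).foldl
         (fun s i => PySem.Set.update s (PySem.List.pyGetD layers i [])) PySem.Set.empty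
       (separator, interior, exterior))
    = (let adj := pvAdjA edges
       let dist := pvBfsB adj (2 * edges.length + 2) [(src, 0)] (PySem.Dict.empty.insert src 0)
       let maxd := (PySem.List.max? dist.values (fun x => x)).getD 0
       if maxd < 2 then
         (PySem.Set.empty, PySem.Set.ofList (PySem.List.pyRange 0 n 1), PySem.Set.empty)
       else
         let width := dist.values.foldl (fun w d => PySem.Dict.modify w d 0 (fun c => c + 1))
           (PySem.Dict.empty : PySem.Dict Int Int)
         let best := (PySem.List.pyRange 2 maxd 1).foldl
           (fun b d => if width.getD d 0 < width.getD b 0 then d else b) 1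
         (PySem.Set.ofList ((dist.items.filter (fun p => p.2 == best)).map (fun p => p.1)),
          PySem.Set.ofList ((dist.items.filter (fun p => decide (p.2 < best))).map (fun p => p.1)),
          PySem.Set.ofList ((dist.items.filter (fun p => decide (best < p.2))).map (fun p => p.1))))
:= by
  have hEnd : ((pvEp edges).dedup).Nodup := List.nodup_dedup _
  have hcandE : ∀ v u, u ∈ (pvAdjA edges).getD v [] → u ∈ (pvEp edges).dedup :=
    fun v u hu => List.mem_dedup.mpr (pv_adj_mem edges v u hu)
  have hcapF : pvCap ((pvEp edges).dedup) [src] ≤ 2 * edges.length := by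
    have h1 : pvCap ((pvEp edges).dedup) [src] ≤ ((pvEp edges).dedup).length :=
      List.length_filter_le _ _
    have h2 : ((pvEp edges).dedup).length ≤ (pvEp edges).length :=
      (List.dedup_sublist _).length_le
    have h3 := pv_ep_length edges
    omega
  have hofl : PySem.Set.ofList [src] = [src] := PySem.Set.ofList_eq_self_of_nodup _ (by simp)
  rcases hPre2 with hedge | hbig | hsrc_ep
  · -- all endpoints name nodes of range(n_nodes)
    have hEp_range : ∀ x ∈ pvEp edges, x ∈ PySem.List.pyRange 0 n 1 := by
      intro x hx
      rw [pvEp, List.mem_flatMap] at hx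
      obtain ⟨e, he, hxe⟩ := hx
      obtain ⟨h1, h2, h3, h4⟩ := hedge e he
      rcases List.mem_cons.mp hxe with rfl | hxe'
      · exact PySem.List.mem_pyRange_one.mpr ⟨h1, h2⟩
      · simp at hxe'
        subst hxe'
        exact PySem.List.mem_pyRange_one.mpr ⟨h3, h4⟩
    have hcandR : ∀ v u, u ∈ (pvAdjA edges).getD v [] → u ∈ PySem.List.pyRange 0 n 1 :=
      fun v u hu => hEp_range _ (pv_adj_mem edges v u hu)
    by_cases hsR : src ∈ PySem.List.pyRange 0 n 1
    · -- source is a node: A's loop is the full layer decomposition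
      apply pv_core_tail' n edges src
      apply pv_loopA_eq (pvAdjA edges) n ((pvEp edges).dedup) hEnd hcandE
        (PySem.List.pyRange 0 n 1) hcandR ?_ _ [src] [src] [[src]] (by simp) ?_
        (PySem.List.pyGetD_neg_one_append_singleton [] [src] []) (by omega)
      · have hb := PySem.List.mem_pyRange_one.mp hsR
        rw [PySem.List.length_pyRange_one]
        omega
      · intro x hx
        simp at hx
        subst hx
        exact hsR
    · -- the source names no node of the graph
      exact pv_core_nonnode n edges src (fun hc => hsR (hEp_range _ hc))
  · -- n_nodes exceeds the number of distinct endpoints: the cutoff can never fire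
    apply pv_core_tail' n edges src
    apply pv_loopA_eq (pvAdjA edges) n ((pvEp edges).dedup) hEnd hcandE
      (src :: (pvEp edges).dedup) ?_ ?_ _ [src] [src] [[src]] (by simp) ?_
      (PySem.List.pyGetD_neg_one_append_singleton [] [src] []) (by omega)
    · intro v u hu
      exact List.mem_cons_of_mem _ (hcandE v u hu)
    · show ((src :: (pvEp edges).dedup).length : Int) ≤ n
      have he : pvEp edges = edges.flatMap (fun e => [e.1, e.2.1]) := rfl
      rw [List.length_cons, he]
      push_cast
      omega
    · intro x hx
      simp at hx
      subst hx
      simp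

  · -- the source touches no edge at all
    exact pv_core_nonnode n edges src hsrc_ep

-- ===== VERDICT (by name: the statement is the Claim_ definition above) =====
theorem find_bfs_separator_spec : Claim_equal_find_bfs_separator := by
  intro n_nodes edges source hDom hPre
  obtain ⟨hsrc0, hdisj⟩ := hPre
  unfold Spec_find_bfs_separator find_bfs_separator find_bfs_separator_alt
  rw [pvAdjB_eq]
  cases source with
  | some s =>
    apply pv_core n_nodes edges s
    rcases hdisj with h | h | h | h
    · exact Or.inl h
    · exact Or.inr (Or.inl h)
    · refine Or.inr (Or.inr ?_)
      simp only [Option.map_some, Option.getD_some, Bool.not_eq_eq_eq_not, Bool.not_true] at h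
      simpa [pvEp] using h
    · exact absurd h.1 (by simp)
  | none =>
    apply pv_core n_nodes edges _
    rcases hdisj with h | h | h | h
    · exact Or.inl h
    · exact Or.inr (Or.inl h)
    · simp at h
    · refine Or.inr (Or.inr ?_)
      -- the resolved source is a node of range(n_nodes), and no endpoint lies there
      have hn : 0 < n_nodes := hsrc0 rfl
      cases hmin : PySem.List.min? (PySem.List.pyRange 0 n_nodes 1)
          (fun v => (((pvAdjA edges).getD v []).length : Int)) with
      | none =>
        have := (PySem.List.min?_eq_none_iff _ _).mp hmin
        have hlen := congrArg List.length this
        rw [PySem.List.length_pyRange_one] at hlen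
        simp at hlen
        omega
      | some m =>
        have hm : m ∈ PySem.List.pyRange 0 n_nodes 1 := PySem.List.min?_mem hmin
        have hb := PySem.List.mem_pyRange_one.mp hm
        show m ∉ pvEp edges
        intro hmem
        exact h.2 m (by simpa [pvEp] using hmem) ⟨hb.1, hb.2⟩
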